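-- pv_equiv track=rewrite | github.com/Dong-Jun-Shin/Study_Algorithm_Python | Coding_test/practice_turn_4/01_greedy/prac_turn4_Q_06.py | solution
-- ===== SOURCE A (Python) =====
-- import heapq
--
-- def solution(food_times, k):
--     if sum(food_times) <= k:
--         return -1
--
--     len_food_times = len(food_times)
--     loof_cnt = 0
--     new_times = []
--     for i in range(len_food_times):
--         heapq.heappush(new_times, (food_times[i], i))
--     new_times.sort()
--
--     while new_times:
--         if len_food_times == 0:
--             break
--         food_time, i = heapq.heappop(new_times)
--         loof_time = (food_time - loof_cnt) * len_food_times
--         if loof_time > k: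
--             heapq.heappush(new_times, (food_time, i))
--             break
--         len_food_times -= 1
--         loof_cnt = food_time    # loof_cnt = loof_cnt + (food_time - loof_cnt)
--         k -= loof_time
--
--     new_times.sort(key=lambda x:x[1])
--
--     return new_times[k % len(new_times)][1] + 1
-- ===== SOURCE B (Python) =====
-- def solution(food_times, k):
--     if sum(food_times) <= k:
--         return -1
--     n = len(food_times)
--
--     def eaten(T):
--         # total spoonfuls consumed once every food has been visited T times
--         # (a food with time t contributes min(t, T))
--         return sum(t if t < T else T for t in food_times)
--
--     # binary search the largest T with eaten(T) <= k
--     lo = min(min(food_times), k, 0)   # eaten(lo) <= k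
--     hi = max(food_times)              # eaten(hi) = sum > k
--     while hi - lo > 1:
--         mid = (lo + hi) // 2
--         if eaten(mid) <= k:
--             lo = mid
--         else:
--             hi = mid
--     T = lo
--     rest = [i for i in range(n) if food_times[i] > T]
--     r = k - eaten(T)
--     return rest[r % len(rest)] + 1
-- ===== Notes on version B (the rewrite author's own statement) =====
-- stated objective: alternative
-- what changed: Replaces A's heap/sort simulation of round-by-round eating with a binary search for the largest whole-round count T such that sum(min(t, T)) <= k, then directly collects the indices with time > T and offsets by (k - eaten(T)) mod their count; no sorting of the times at all.
import Mathlib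
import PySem

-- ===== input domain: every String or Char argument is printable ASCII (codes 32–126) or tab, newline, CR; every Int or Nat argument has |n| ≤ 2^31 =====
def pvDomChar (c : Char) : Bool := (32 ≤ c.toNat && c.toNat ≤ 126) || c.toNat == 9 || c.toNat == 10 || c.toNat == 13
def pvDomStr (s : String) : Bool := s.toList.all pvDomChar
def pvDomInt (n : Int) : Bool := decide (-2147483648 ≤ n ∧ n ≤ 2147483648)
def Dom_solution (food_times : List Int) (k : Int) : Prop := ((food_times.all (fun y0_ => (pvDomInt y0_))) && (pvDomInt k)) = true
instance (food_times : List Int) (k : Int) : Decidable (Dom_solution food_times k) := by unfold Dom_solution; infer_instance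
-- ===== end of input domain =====

-- B replaces A's heap/sort simulation of the eating rounds by a binary search for the
-- largest whole-round count T with sum(min(t,T)) <= k, then indexes the foods with
-- time > T directly (no sorting of the times at all): a different algorithm.

-- ===== PORT A =====
-- The heapq heap is modeled as the plain list of its elements: exact here, because A
-- fully sorts new_times before the pop loop (so heappop returns elements in sorted
-- order) and sorts by index again before indexing, so only the pop order (= minimum
-- order) and the final multiset are observable.
def solLoopA : List (Int × Int) → Int → Int → Int → List (Int × Int) × Int
  | [], _, _, k => ([], k)
  | (ft, i) :: rest, lenf, loof, k =>
    if lenf = 0 then ((ft, i) :: rest, k)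
    else
      let lt := (ft - loof) * lenf
      if lt > k then ((ft, i) :: rest, k)       -- heappush back, break
      else solLoopA rest (lenf - 1) ft (k - lt)

def solution (food_times : List Int) (k : Int) : Int :=
  if food_times.sum ≤ k then -1
  else
    let len_food_times : Int := (food_times.length : Int)
    let new_times :=
      (PySem.List.pyRange 0 len_food_times 1).foldl
        (fun acc i => acc ++ [(PySem.List.pyGetD food_times i 0, i)]) []
    let new_times := PySem.List.sorted2 new_times (fun x => x.1) (fun x => x.2)
    let res := solLoopA new_times len_food_times 0 k
    let fin := PySem.List.sorted res.1 (fun x => x.2)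
    (PySem.List.pyGetD fin (PySem.Int.mod res.2 (fin.length : Int)) (0, 0)).2 + 1

-- ===== PORT B =====
-- eaten T = total spoonfuls consumed once every food has been visited T times
def eatenB (food_times : List Int) (T : Int) : Int :=
  (food_times.map (fun t => if t < T then t else T)).sum

-- while hi - lo > 1: mid = (lo+hi)//2; if eaten(mid) <= k: lo = mid else: hi = mid
def bsLoop (food_times : List Int) (k : Int) (lo hi : Int) : Int :=
  if 1 < hi - lo then
    let mid := PySem.Int.floordiv (lo + hi) 2
    if eatenB food_times mid ≤ k then bsLoop food_times k mid hi
    else bsLoop food_times k lo mid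
  else lo
termination_by (hi - lo).toNat
decreasing_by
  all_goals
    simp only [mid, PySem.Int.floordiv_eq_ediv_of_pos (by norm_num : (0:Int) < 2)] at *
    omega

def solution_alt (food_times : List Int) (k : Int) : Int :=
  if food_times.sum ≤ k then -1
  else
    let n : Int := (food_times.length : Int)
    let lo : Int := min (min ((PySem.List.min? food_times (fun t => t)).getD 0) k) 0
    let hi : Int := (PySem.List.max? food_times (fun t => t)).getD 0
    let T := bsLoop food_times k lo hi
    let rest := (PySem.List.pyRange 0 n 1).filter
      (fun i => decide (T < PySem.List.pyGetD food_times i 0))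
    let r := k - eatenB food_times T
    PySem.List.pyGetD rest (PySem.Int.mod r (rest.length : Int)) 0 + 1

-- ===== PRECONDITION & SPEC =====
-- Pre_ excludes only food_times = [] with k < 0, where both A and B raise
-- (A: ZeroDivisionError from k % 0, B: ValueError from min([])).
def Pre_solution (food_times : List Int) (k : Int) : Prop := food_times ≠ [] ∨ 0 ≤ k
instance (food_times : List Int) (k : Int) : Decidable (Pre_solution food_times k) := by
  unfold Pre_solution; infer_instance
def pvWitness_solution : List Int × Int := ([3, 1, 2], 5)

def Spec_solution (food_times : List Int) (k : Int) (out : Int) : Prop := out = solution_alt food_times k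
instance (food_times : List Int) (k : Int) (out : Int) : Decidable (Spec_solution food_times k out) := by unfold Spec_solution; infer_instance

-- ===== CLAIM (what is proved, stated in full; the proofs are below) =====
def Claim_equal_solution : Prop := ∀ (food_times : List Int) (k : Int), Dom_solution food_times k → Pre_solution food_times k → Spec_solution food_times k (solution food_times k)


-- ===== LEMMAS AND PROOFS =====

-- Proof-only abbreviations: the element value at an index, and the (value, index) pair.
def pvG (ft : List Int) (i : Int) : Int := PySem.List.pyGetD ft i 0
def pvF (ft : List Int) (i : Int) : Int × Int := (pvG ft i, i)
-- Python tuple comparison as used by sorted2 with keys .1, .2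
def pvBP : Int × Int → Int × Int → Bool :=
  fun a b => decide (a.1 < b.1) || (!decide (b.1 < a.1) && decide (a.2 < b.2))

-- A's pop loop in terms of indices only (values looked up through ft).
def idxLoop (ft : List Int) : List Int → Int → Int → Int → List Int × Int
  | [], _, k, _ => ([], k)
  | i :: rest, prev, k, rem =>
    let cost := (PySem.List.pyGetD ft i 0 - prev) * rem
    if cost > k then (i :: rest, k)
    else idxLoop ft rest (PySem.List.pyGetD ft i 0) (k - cost) (rem - 1)

theorem pv_sorted2_eq (xs : List (Int × Int)) :
    PySem.List.sorted2 xs (fun x => x.1) (fun x => x.2) =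
      xs.foldl (fun acc x => PySem.List.insertBy pvBP x acc) [] := rfl

theorem pv_insert_pair (ft : List Int) (i : Int) (acc : List Int)
    (h : ∀ j ∈ acc, j < i) :
    PySem.List.insertBy pvBP (pvF ft i) (acc.map (pvF ft)) =
      (PySem.List.insertBy (fun a b => decide (pvG ft a < pvG ft b)) i acc).map (pvF ft) := by
  induction acc with
  | nil => rfl
  | cons j acc ih =>
    have hji : j < i := h j (by simp)
    have hb : pvBP (pvF ft i) (pvF ft j) = decide (pvG ft i < pvG ft j) := by
      simp [pvBP, pvF, show ¬ (i < j) by omega]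
    simp only [List.map_cons, PySem.List.insertBy, hb]
    by_cases hlt : pvG ft i < pvG ft j
    · simp [hlt, pvF]
    · simp only [hlt, decide_false, Bool.false_eq_true, if_false, List.map_cons]
      rw [ih (fun j' hj' => h j' (by simp [hj']))]

theorem pv_fold_pair (ft : List Int) (l : List Int) : ∀ (acc : List Int),
    l.Pairwise (· < ·) → (∀ i ∈ l, ∀ j ∈ acc, j < i) →
    (l.map (pvF ft)).foldl (fun a x => PySem.List.insertBy pvBP x a) (acc.map (pvF ft)) =
      (l.foldl (fun a x => PySem.List.insertBy (fun a b => decide (pvG ft a < pvG ft b)) x a) acc).map (pvF ft) := by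
  induction l with
  | nil => intro acc _ _; rfl
  | cons i l ih =>
    intro acc hp h
    simp only [List.map_cons, List.foldl_cons]
    rw [pv_insert_pair ft i acc (h i (by simp))]
    refine ih _ hp.of_cons ?_
    intro i' hi' j hj
    rcases (PySem.List.mem_insertBy _ _ _ _).1 hj with rfl | hj
    · exact (List.pairwise_cons.1 hp).1 i' hi'
    · exact h i' (by simp [hi']) j hj

theorem pv_insert_snd (ft : List Int) (x : Int) (acc : List Int) :
    PySem.List.insertBy (fun a b : Int × Int => decide (a.2 < b.2)) (pvF ft x) (acc.map (pvF ft)) =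
      (PySem.List.insertBy (fun a b : Int => decide (a < b)) x acc).map (pvF ft) := by
  induction acc with
  | nil => rfl
  | cons j acc ih =>
    simp only [List.map_cons, PySem.List.insertBy]
    by_cases hlt : x < j
    · simp [pvF, hlt]
    · simp only [pvF, hlt, decide_false, Bool.false_eq_true, if_false, List.map_cons]
      rw [← ih]; rfl

theorem pv_fold_snd (ft : List Int) (l : List Int) : ∀ (acc : List Int),
    (l.map (pvF ft)).foldl (fun a x => PySem.List.insertBy (fun a b : Int × Int => decide (a.2 < b.2)) x a) (acc.map (pvF ft)) =
      (l.foldl (fun a x => PySem.List.insertBy (fun a b : Int => decide (a < b)) x a) acc).map (pvF ft) := by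
  induction l with
  | nil => intro acc; rfl
  | cons i l ih =>
    intro acc
    simp only [List.map_cons, List.foldl_cons]
    rw [pv_insert_snd]; exact ih _

theorem pv_loop (ft : List Int) : ∀ (l : List Int) (loof k : Int),
    solLoopA (l.map (pvF ft)) (l.length : Int) loof k =
      ((idxLoop ft l loof k (l.length : Int)).1.map (pvF ft),
       (idxLoop ft l loof k (l.length : Int)).2) := by
  intro l
  induction l with
  | nil => intro loof k; rfl
  | cons i l ih =>
    intro loof k
    simp only [List.map_cons, pvF, pvG, solLoopA, idxLoop, List.length_cons,
      Nat.cast_add, Nat.cast_one]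
    rw [if_neg (show ¬ ((l.length : Int) + 1 = 0) by omega)]
    split_ifs with hk
    · simp [pvF, pvG]
    · rw [show (l.length : Int) + 1 - 1 = (l.length : Int) by ring]
      exact ih _ _

theorem pv_range_pairwise (n : Nat) :
    (PySem.List.pyRange 0 (n : Int) 1).Pairwise (· < ·) := by
  rw [PySem.List.pyRange_zero_natCast]
  exact (List.pairwise_lt_range).map _ (fun a b hab => by exact_mod_cast hab)

theorem pv_range_length (n : Nat) :
    (PySem.List.pyRange 0 (n : Int) 1).length = n := by
  rw [PySem.List.pyRange_zero_natCast]; simp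

-- ---- eatenB basic facts ----

theorem pv_eaten_mono (ft : List Int) (V W : Int) (h : V ≤ W) :
    eatenB ft V ≤ eatenB ft W := by
  induction ft with
  | nil => simp [eatenB]
  | cons t ft ih =>
    simp only [eatenB, List.map_cons, List.sum_cons] at *
    have : (if t < V then t else V) ≤ (if t < W then t else W) := by split_ifs <;> omega
    omega

theorem pv_eaten_of_le (ft : List Int) (V : Int) (h : ∀ t ∈ ft, V ≤ t) :
    eatenB ft V = V * (ft.length : Int) := by
  induction ft with
  | nil => simp [eatenB]
  | cons t ft ih =>
    have ht : V ≤ t := h t (by simp)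
    simp only [eatenB, List.map_cons, List.sum_cons, List.length_cons] at *
    rw [if_neg (by omega), ih (fun t' ht' => h t' (by simp [ht']))]
    push_cast; ring

theorem pv_eaten_of_ge (ft : List Int) (V : Int) (h : ∀ t ∈ ft, t ≤ V) :
    eatenB ft V = ft.sum := by
  induction ft with
  | nil => simp [eatenB]
  | cons t ft ih =>
    have ht : t ≤ V := h t (by simp)
    simp only [eatenB, List.map_cons, List.sum_cons] at *
    rw [ih (fun t' ht' => h t' (by simp [ht']))]
    split_ifs <;> omega

theorem pv_eaten_append (xs ys : List Int) (V : Int) :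
    eatenB (xs ++ ys) V = eatenB xs V + eatenB ys V := by
  simp [eatenB]

theorem pv_eaten_perm (xs ys : List Int) (V : Int) (h : xs.Perm ys) :
    eatenB xs V = eatenB ys V := by
  exact (h.map _).sum_eq

-- ---- correctness of the binary search ----

theorem pv_bs_spec (ft : List Int) (k : Int) : ∀ (m : Nat) (lo hi : Int),
    (hi - lo).toNat = m → eatenB ft lo ≤ k → k < eatenB ft hi →
    eatenB ft (bsLoop ft k lo hi) ≤ k ∧ k < eatenB ft (bsLoop ft k lo hi + 1) := by
  intro m
  induction m using Nat.strong_induction_on with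
  | _ m ih =>
    intro lo hi hm hlo hhi
    have hlolt : lo < hi := by
      by_contra hle
      exact absurd (pv_eaten_mono ft hi lo (by omega)) (by omega)
    rw [bsLoop]
    by_cases hgap : 1 < hi - lo
    · rw [if_pos hgap]
      have hmid := PySem.Int.floordiv_eq_ediv_of_pos (show (0:Int) < 2 by norm_num) (a := lo + hi)
      set mid := PySem.Int.floordiv (lo + hi) 2 with hmiddef
      have hb1 : lo < mid := by omega
      have hb2 : mid < hi := by omega
      by_cases hle : eatenB ft mid ≤ k
      · rw [if_pos hle]
        exact ih ((hi - mid).toNat) (by omega) mid hi rfl hle hhi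
      · rw [if_neg hle]
        exact ih ((mid - lo).toNat) (by omega) lo mid rfl hlo (by omega)
    · rw [if_neg hgap]
      have : hi = lo + 1 := by omega
      exact ⟨hlo, by rw [← this]; exact hhi⟩

-- ---- mod is invariant under adding a multiple of the modulus ----
theorem pv_mod_add_mul (a c b : Int) :
    PySem.Int.mod (a + c * b) b = PySem.Int.mod a b := by
  simp [PySem.Int.mod]

-- ---- the crux: characterization of A's pop loop by the threshold T ----

theorem pv_loop_char (ft : List Int) (k T : Int)
    (hT1 : eatenB ft T ≤ k) (hT2 : k < eatenB ft (T + 1)) :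
    ∀ (l C : List Int) (prev k' : Int),
      ((C ++ l).map (pvG ft)).Perm ft →
      (C ++ l).Pairwise (fun i j => pvG ft i ≤ pvG ft j) →
      (∀ i ∈ C, eatenB ft (pvG ft i) ≤ k) →
      k' = k - ((C.map (pvG ft)).sum + prev * (l.length : Int)) →
      (idxLoop ft l prev k' (l.length : Int)).1 = l.filter (fun i => decide (T < pvG ft i)) ∧
      PySem.Int.mod (idxLoop ft l prev k' (l.length : Int)).2
          (((idxLoop ft l prev k' (l.length : Int)).1.length : Int)) =
        PySem.Int.mod (k - eatenB ft T)
          (((idxLoop ft l prev k' (l.length : Int)).1.length : Int)) := by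
  intro l
  induction l with
  | nil =>
    intro C prev k' hperm hpair hCT hk'
    -- everything consumed: every time of ft is ≤ T, so eatenB ft T = ft.sum and k' = k - ft.sum
    have hle : ∀ t ∈ ft, t ≤ T := by
      intro t htmem
      have : t ∈ (C ++ ([] : List Int)).map (pvG ft) := (hperm.mem_iff).2 htmem
      simp only [List.append_nil, List.mem_map] at this
      obtain ⟨i, hiC, rfl⟩ := this
      by_contra hgt
      exact absurd (le_trans (pv_eaten_mono ft (T + 1) (pvG ft i) (by omega)) (hCT i hiC)) (by omega)
    have hsum : (C.map (pvG ft)).sum = ft.sum := by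
      have := hperm.sum_eq; simpa using this
    have hET : eatenB ft T = ft.sum := pv_eaten_of_ge ft T hle
    constructor
    · simp [idxLoop]
    · simp only [idxLoop]
      rw [hk', hsum, hET]; norm_num
  | cons i l ihl =>
    intro C prev k' hperm hpair hCT hk'
    have hpairC : ∀ j ∈ C, pvG ft j ≤ pvG ft i := by
      intro j hj
      exact (List.pairwise_append.1 hpair).2.2 j hj i (by simp)
    have hpairl : ∀ j ∈ l, pvG ft i ≤ pvG ft j :=
      (List.pairwise_cons.1 (List.pairwise_append.1 hpair).2.1).1
    -- eatenB at the head value v splits over the permutation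
    have hsplit : ∀ V, (∀ j ∈ C, pvG ft j ≤ V) → (∀ j ∈ i :: l, V ≤ pvG ft j) →
        eatenB ft V = (C.map (pvG ft)).sum + V * ((l.length : Int) + 1) := by
      intro V hCv hlv
      have h1 : eatenB ft V = eatenB ((C ++ i :: l).map (pvG ft)) V :=
        (pv_eaten_perm _ _ _ hperm).symm
      rw [h1, List.map_append, pv_eaten_append,
        pv_eaten_of_ge _ _ (by intro t htm; obtain ⟨j, hj, rfl⟩ := List.mem_map.1 htm; exact hCv j hj),
        pv_eaten_of_le _ _ (by intro t htm; obtain ⟨j, hj, rfl⟩ := List.mem_map.1 htm; exact hlv j hj)]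
      simp
    set v := pvG ft i with hv
    have hcost : ((pvG ft i - prev) * ((i :: l).length : Int) > k') ↔ k < eatenB ft v := by
      have hEv : eatenB ft v = (C.map (pvG ft)).sum + v * ((l.length : Int) + 1) :=
        hsplit v hpairC (by intro j hj; rcases List.mem_cons.1 hj with rfl | hj
                            · exact le_refl _
                            · exact hpairl j hj)
      rw [hk', hEv]
      simp only [List.length_cons]
      push_cast
      constructor <;> intro h <;> nlinarith
    by_cases hbreak : k < eatenB ft v
    · -- break: the whole remaining list survives
      have hTv : T < v := by
        by_contra hle
        exact absurd (le_trans (pv_eaten_mono ft v T (by omega)) hT1) (by omega)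
      have hres : idxLoop ft (i :: l) prev k' ((i :: l).length : Int) = (i :: l, k') := by
        have hc := hcost.2 hbreak
        simp only [pvG] at hc
        simp only [idxLoop]
        rw [if_pos hc]
      rw [hres]
      constructor
      · rw [List.filter_eq_self.2]
        intro j hj
        rcases List.mem_cons.1 hj with rfl | hj
        · simpa using hTv
        · simp only [decide_eq_true_eq]
          exact lt_of_lt_of_le hTv (hpairl j hj)
      · -- k' and k - eatenB ft T differ by (T - prev) * (length)
        have hCleT : ∀ j ∈ C, pvG ft j ≤ T := by
          intro j hj
          by_contra hgt
          exact absurd (le_trans (pv_eaten_mono ft (T + 1) (pvG ft j) (by omega)) (hCT j hj)) (by omega)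
        have hET : eatenB ft T = (C.map (pvG ft)).sum + T * ((l.length : Int) + 1) :=
          hsplit T hCleT (by intro j hj; rcases List.mem_cons.1 hj with rfl | hj
                             · omega
                             · have := hpairl j hj; omega)
      -- k' = (k - eatenB ft T) + (T - prev) * m
        have hrw : k' = (k - eatenB ft T) + (T - prev) * (((i :: l).length : Int)) := by
          rw [hk', hET]; simp only [List.length_cons]; push_cast; ring
        rw [hrw, pv_mod_add_mul]
    · -- consume the head and recurse
      have hvT : v ≤ T := by
        by_contra hgt
        exact absurd (le_trans (pv_eaten_mono ft (T + 1) v (by omega)) (by omega : eatenB ft v ≤ k)) (by omega)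
      have hres : idxLoop ft (i :: l) prev k' ((i :: l).length : Int) =
          idxLoop ft l v (k' - (v - prev) * ((i :: l).length : Int)) (((i :: l).length : Int) - 1) := by
        have hc : ¬ ((pvG ft i - prev) * (((i :: l).length : Int)) > k') :=
          fun h => hbreak (hcost.1 h)
        simp only [pvG] at hc
        simp only [idxLoop]
        rw [if_neg hc]
        rw [hv]; simp only [pvG]
      have hlen1 : (((i :: l).length : Int)) - 1 = (l.length : Int) := by
        simp only [List.length_cons]; push_cast; ring
      rw [hres, hlen1]
      have := ihl (C ++ [i]) v (k' - (v - prev) * ((i :: l).length : Int))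
        (by rw [List.append_assoc]; simpa using hperm)
        (by rw [List.append_assoc]; simpa using hpair)
        (by intro j hj
            rcases List.mem_append.1 hj with hj | hj
            · exact hCT j hj
            · simp only [List.mem_singleton] at hj; subst hj; rw [← hv]; omega)
        (by rw [hk']; simp only [List.map_append, List.sum_append, List.map_cons, List.map_nil,
              List.sum_cons, List.sum_nil, List.length_cons]
            push_cast; ring)
      rcases this with ⟨h1, h2⟩
      refine ⟨?_, h2⟩
      rw [h1, List.filter_cons, if_neg (by simp; omega)]

-- ===== VERDICT (by name: the statement is the Claim_ definition above) =====
theorem solution_spec : Claim_equal_solution := by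
  intro ft k hdom hpre
  unfold Spec_solution solution solution_alt
  by_cases hs : ft.sum ≤ k
  · simp [hs]
  · simp only [hs, if_false]
    have hft : ft ≠ [] := by
      rintro rfl
      rcases hpre with h | h
      · exact h rfl
      · exact hs (by simpa using h)
    have hn : 0 < ft.length := List.length_pos_iff.mpr hft
    set rg := PySem.List.pyRange 0 (ft.length : Int) 1 with hrg
    set ord := PySem.List.sorted rg (fun i => PySem.List.pyGetD ft i 0) with hord
    -- ==== A side: reduce to idxLoop over ord ====
    have h1 : rg.foldl (fun acc i => acc ++ [(PySem.List.pyGetD ft i 0, i)]) [] = rg.map (pvF ft) := by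
      simpa using PySem.List.foldl_append_singleton_eq_map (pvF ft) rg []
    have h2 : PySem.List.sorted2 (rg.map (pvF ft)) (fun x => x.1) (fun x => x.2) = ord.map (pvF ft) := by
      rw [pv_sorted2_eq, hord, PySem.List.sorted_eq_foldl_insertBy]
      have := pv_fold_pair ft rg [] (pv_range_pairwise ft.length) (by simp)
      simpa [pvG] using this
    have h3 : ord.length = ft.length := by
      rw [hord, PySem.List.length_sorted]; exact pv_range_length ft.length
    have h4 : solLoopA (ord.map (pvF ft)) (ft.length : Int) 0 k =
        ((idxLoop ft ord 0 k (ft.length : Int)).1.map (pvF ft),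
         (idxLoop ft ord 0 k (ft.length : Int)).2) := by
      rw [show ((ft.length : Int)) = (ord.length : Int) by rw [h3]]
      exact pv_loop ft ord 0 k
    set res := idxLoop ft ord 0 k (ft.length : Int) with hres
    -- ==== B side: the binary-search bounds ====
    obtain ⟨mv, hmin⟩ : ∃ mv, PySem.List.min? ft (fun t => t) = some mv := by
      cases hm : PySem.List.min? ft (fun t => t) with
      | none => exact absurd ((PySem.List.min?_eq_none_iff _ _).1 hm) hft
      | some mv => exact ⟨mv, rfl⟩
    obtain ⟨Mv, hmax⟩ : ∃ Mv, PySem.List.max? ft (fun t => t) = some Mv := by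
      cases hm : PySem.List.max? ft (fun t => t) with
      | none => exact absurd ((PySem.List.max?_eq_none_iff _ _).1 hm) hft
      | some Mv => exact ⟨Mv, rfl⟩
    have hminle : ∀ t ∈ ft, mv ≤ t := PySem.List.min?_isMin hmin
    have hmaxge : ∀ t ∈ ft, t ≤ Mv := PySem.List.max?_isMax hmax
    set lo := min (min mv k) 0 with hlo_def
    have hlo : eatenB ft lo ≤ k := by
      rw [pv_eaten_of_le ft lo (fun t htm => le_trans (by omega) (hminle t htm))]
      have h1l : (1 : Int) ≤ (ft.length : Int) := by exact_mod_cast hn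
      nlinarith [min_le_left (min mv k) 0, min_le_right (min mv k) 0,
        min_le_right mv k]
    have hhi : k < eatenB ft Mv := by
      rw [pv_eaten_of_ge ft Mv hmaxge]; omega
    set T := bsLoop ft k lo Mv with hT_def
    obtain ⟨hT1, hT2⟩ := pv_bs_spec ft k ((Mv - lo).toNat) lo Mv rfl hlo hhi
    -- ==== the loop characterization ====
    have hpermord : (ord.map (pvG ft)).Perm ft := by
      have hperm : (ord.map (pvG ft)).Perm (rg.map (pvG ft)) :=
        (PySem.List.sorted_perm rg _ false).map _
      have hmap : rg.map (pvG ft) = ft := by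
        simpa [pvG, hrg] using PySem.List.map_pyGetD_pyRange_zero' ft 0
      rw [hmap] at hperm; exact hperm
    have hpairord : ord.Pairwise (fun i j => pvG ft i ≤ pvG ft j) := by
      have := PySem.List.sorted_pairwise (xs := rg) (key := fun i => PySem.List.pyGetD ft i 0)
      simpa [pvG, hord] using this
    have hchar := pv_loop_char ft k T hT1 hT2 ord [] 0 k
      (by simpa using hpermord) (by simpa using hpairord) (by simp) (by simp)
    rw [show ((ord.length : Int)) = (ft.length : Int) by rw [h3], ← hres] at hchar
    obtain ⟨hA1, hA2⟩ := hchar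
    -- ==== the surviving tail, as a sublist of the range ====
    set p : Int → Bool := fun i => decide (T < pvG ft i) with hp
    have hfilperm : (rg.filter p).Perm (ord.filter p) := by
      exact ((PySem.List.sorted_perm rg _ false).filter p).symm
    have hfilpair : (rg.filter p).Pairwise (· < ·) :=
      (pv_range_pairwise ft.length).sublist List.filter_sublist
    have hsorted_filter : PySem.List.sorted (ord.filter p) (fun x => x) = rg.filter p :=
      PySem.List.sorted_eq_of_perm_of_pairwise_lt (xs := ord.filter p)
        (ys := rg.filter p) (key := fun x => x) hfilperm (by simpa using hfilpair)
    -- the tail is nonempty: the index of the maximum survives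
    have hTM : T < Mv := by
      by_contra hle
      exact absurd (le_trans (pv_eaten_mono ft Mv T (by omega)) hT1) (by omega)
    have hfil_ne : rg.filter p ≠ [] := by
      have hMmem : Mv ∈ ft := PySem.List.max?_mem hmax
      obtain ⟨j, hj, hjv⟩ := List.mem_iff_getElem.1 hMmem
      have hjrg : (j : Int) ∈ rg := by
        rw [hrg, PySem.List.mem_pyRange_one]
        constructor <;> [omega; exact_mod_cast hj]
      have hpj : p (j : Int) = true := by
        rw [hp]
        simp only [decide_eq_true_eq, pvG]
        rw [PySem.List.pyGetD_natCast]
        rw [List.getD_eq_getElem ft 0 hj, hjv]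
        exact hTM
      intro hnil
      have : (j : Int) ∈ rg.filter p := List.mem_filter.2 ⟨hjrg, hpj⟩
      rw [hnil] at this; exact absurd this (List.not_mem_nil)
    have hlen_pos : 0 < ((rg.filter p).length : Int) := by
      have := List.length_pos_iff.mpr hfil_ne; exact_mod_cast this
    -- ==== final indexing on both sides ====
    have h6 : PySem.List.sorted (res.1.map (pvF ft)) (fun x => x.2) =
        (PySem.List.sorted res.1 (fun i => i)).map (pvF ft) := by
      rw [PySem.List.sorted_eq_foldl_insertBy, PySem.List.sorted_eq_foldl_insertBy]
      simpa using pv_fold_snd ft res.1 []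
    have h7 : PySem.List.sorted res.1 (fun i => i) = rg.filter p := by
      rw [hA1]; exact hsorted_filter
    have hlen_eq : (res.1.length : Int) = ((rg.filter p).length : Int) := by
      rw [hA1]; exact_mod_cast hfilperm.symm.length_eq
    rw [h1, h2, h4]
    simp only [h6, h7, List.length_map, hmin, hmax, Option.getD_some]
    rw [← hlo_def, ← hT_def]
    have hlab : (fun i => decide (T < PySem.List.pyGetD ft i 0)) = p := by
      funext i; simp [hp, pvG]
    rw [hlab]
    rw [hlen_eq] at hA2
    rw [hA2]
    have hidx0 : 0 ≤ PySem.Int.mod (k - eatenB ft T) (((rg.filter p).length : Int)) :=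
      PySem.Int.mod_nonneg _ hlen_pos
    have hidx1 : PySem.Int.mod (k - eatenB ft T) (((rg.filter p).length : Int)) <
        ((rg.filter p).length : Int) := PySem.Int.mod_lt _ hlen_pos
    rw [PySem.List.pyGetD_eq_getElem _ _ hidx0 (by simpa using hidx1),
        PySem.List.pyGetD_eq_getElem _ _ hidx0 (by simpa using hidx1)]
    simp [pvF]
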